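-- pv_equiv track=rewrite | github.com/KoYeJoon/coding_test_python | BaekJoon/samsung/210424_14499.py | dice_face_change
-- ===== SOURCE A (Python) =====
-- def dice_face_change(num,old_dice) :
--     new_dice = [0 for _ in range(6)]
--     # 남
--     if num == 0:
--         new_dice[0] = old_dice[0]
--         new_dice[1] = old_dice[1]
--         new_dice[2] = old_dice[4]
--         new_dice[3] = old_dice[5]
--         new_dice[4] = old_dice[3]
--         new_dice[5] = old_dice[2]
--     # 동
--     elif num == 1 :
--         new_dice[0] = old_dice[3]
--         new_dice[1] = old_dice[2]
--         new_dice[2] = old_dice[0]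
--         new_dice[3] = old_dice[1]
--         new_dice[4] = old_dice[4]
--         new_dice[5] = old_dice[5]
--     # 서
--     elif num == 2:
--         new_dice[0] = old_dice[2]
--         new_dice[1] = old_dice[3]
--         new_dice[2] = old_dice[1]
--         new_dice[3] = old_dice[0]
--         new_dice[4] = old_dice[4]
--         new_dice[5] = old_dice[5]
--     # 북
--     else :
--         new_dice[0] = old_dice[0]
--         new_dice[1] = old_dice[1]
--         new_dice[2] = old_dice[5]
--         new_dice[3] = old_dice[4]
--         new_dice[4] = old_dice[2]
--         new_dice[5] = old_dice[3]
--
--     return new_dice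
-- ===== SOURCE B (Python) =====
-- def dice_face_change(num, old_dice):
--     # A quarter-turn group decomposition: only two generator rolls are written
--     # out; south is north applied three times and west is east applied three
--     # times (inverse rotations), so each case is k iterations of one generator.
--     def east(d):
--         return [d[3], d[2], d[0], d[1], d[4], d[5]]
--
--     def north(d):
--         return [d[0], d[1], d[5], d[4], d[2], d[3]]
--
--     roll, k = (north, 3) if num == 0 else \
--               (east, 1) if num == 1 else \
--               (east, 3) if num == 2 else (north, 1)
--     d = old_dice
--     for _ in range(k):
--         d = roll(d)
--     return d
-- ===== Notes on version B (the rewrite author's own statement) =====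
-- stated objective: alternative
-- what changed: B replaces A's four hand-written per-index assignment branches by a group decomposition: only the east and north quarter-turn generators are coded, and south/west are obtained by iterating the opposite generator three times (its inverse).
-- outside the precondition, e.g. on dice_face_change(0, [1, 2, 3]): A raises IndexError, B raises IndexError
import Mathlib
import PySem

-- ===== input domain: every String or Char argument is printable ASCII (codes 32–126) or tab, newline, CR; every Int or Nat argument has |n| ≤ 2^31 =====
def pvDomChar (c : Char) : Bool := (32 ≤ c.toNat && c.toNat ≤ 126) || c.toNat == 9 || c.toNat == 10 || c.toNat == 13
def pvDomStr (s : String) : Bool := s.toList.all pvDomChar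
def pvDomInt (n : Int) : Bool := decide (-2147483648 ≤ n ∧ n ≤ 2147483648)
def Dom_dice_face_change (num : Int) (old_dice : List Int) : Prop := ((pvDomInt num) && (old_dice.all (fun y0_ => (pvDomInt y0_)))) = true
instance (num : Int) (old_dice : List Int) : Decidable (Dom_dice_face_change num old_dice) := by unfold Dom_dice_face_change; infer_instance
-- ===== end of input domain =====

-- B codes only the east/north quarter-turn generators and obtains south/west by
-- iterating the opposite generator three times (objective: alternative).

-- ===== PORT A =====
-- old_dice[i] for both ports; Pre_ guarantees the index is in range, so the default never fires
def pvGet (xs : List Int) (i : Int) : Int := (PySem.List.pyGet? xs i).getD 0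

def dice_face_change (num : Int) (old_dice : List Int) : List Int :=
  -- new_dice = [0]*6, then six assignments per branch; written as the resulting list
  if num = 0 then
    [pvGet old_dice 0, pvGet old_dice 1, pvGet old_dice 4,
     pvGet old_dice 5, pvGet old_dice 3, pvGet old_dice 2]
  else if num = 1 then
    [pvGet old_dice 3, pvGet old_dice 2, pvGet old_dice 0,
     pvGet old_dice 1, pvGet old_dice 4, pvGet old_dice 5]
  else if num = 2 then
    [pvGet old_dice 2, pvGet old_dice 3, pvGet old_dice 1,
     pvGet old_dice 0, pvGet old_dice 4, pvGet old_dice 5]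
  else
    [pvGet old_dice 0, pvGet old_dice 1, pvGet old_dice 5,
     pvGet old_dice 4, pvGet old_dice 2, pvGet old_dice 3]

-- ===== PORT B =====
-- east generator: d -> [d[3], d[2], d[0], d[1], d[4], d[5]]
def pvEast (d : List Int) : List Int :=
  [pvGet d 3, pvGet d 2, pvGet d 0, pvGet d 1, pvGet d 4, pvGet d 5]

-- north generator: d -> [d[0], d[1], d[5], d[4], d[2], d[3]]
def pvNorth (d : List Int) : List Int :=
  [pvGet d 0, pvGet d 1, pvGet d 5, pvGet d 4, pvGet d 2, pvGet d 3]

def dice_face_change_alt (num : Int) (old_dice : List Int) : List Int :=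
  let rk : (List Int → List Int) × Nat :=
    if num = 0 then (pvNorth, 3)
    else if num = 1 then (pvEast, 1)
    else if num = 2 then (pvEast, 3)
    else (pvNorth, 1)
  -- for _ in range(k): d = roll(d)
  (List.range rk.2).foldl (fun d _ => rk.1 d) old_dice

-- ===== PRECONDITION & SPEC =====
-- A indexes old_dice at 0..5 and raises IndexError on shorter lists; Pre_ excludes exactly those.
def Pre_dice_face_change (num : Int) (old_dice : List Int) : Prop := 6 ≤ old_dice.length
instance (num : Int) (old_dice : List Int) : Decidable (Pre_dice_face_change num old_dice) := by unfold Pre_dice_face_change; infer_instance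
def pvWitness_dice_face_change : Int × List Int := (1, [1, 2, 3, 4, 5, 6])

def Spec_dice_face_change (num : Int) (old_dice : List Int) (out : List Int) : Prop := out = dice_face_change_alt num old_dice
instance (num : Int) (old_dice : List Int) (out : List Int) : Decidable (Spec_dice_face_change num old_dice out) := by unfold Spec_dice_face_change; infer_instance

-- ===== CLAIM (what is proved, stated in full; the proofs are below) =====
def Claim_equal_dice_face_change : Prop := ∀ (num : Int) (old_dice : List Int), Dom_dice_face_change num old_dice → Pre_dice_face_change num old_dice → Spec_dice_face_change num old_dice (dice_face_change num old_dice)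

-- ===== LEMMAS AND PROOFS =====
-- ===== VERDICT (by name: the statement is the Claim_ definition above) =====
theorem dice_face_change_spec : Claim_equal_dice_face_change := by
  intro num old_dice _ hpre
  unfold Spec_dice_face_change
  -- expose six head elements of old_dice
  obtain ⟨a, rest1, rfl⟩ : ∃ a r, old_dice = a :: r := by
    cases old_dice with
    | nil => simp [Pre_dice_face_change] at hpre
    | cons a r => exact ⟨a, r, rfl⟩
  obtain ⟨b, rest2, rfl⟩ : ∃ b r, rest1 = b :: r := by
    cases rest1 with
    | nil => simp [Pre_dice_face_change] at hpre
    | cons b r => exact ⟨b, r, rfl⟩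
  obtain ⟨c, rest3, rfl⟩ : ∃ c r, rest2 = c :: r := by
    cases rest2 with
    | nil => simp [Pre_dice_face_change] at hpre
    | cons c r => exact ⟨c, r, rfl⟩
  obtain ⟨d, rest4, rfl⟩ : ∃ d r, rest3 = d :: r := by
    cases rest3 with
    | nil => simp [Pre_dice_face_change] at hpre
    | cons d r => exact ⟨d, r, rfl⟩
  obtain ⟨e, rest5, rfl⟩ : ∃ e r, rest4 = e :: r := by
    cases rest4 with
    | nil => simp [Pre_dice_face_change] at hpre
    | cons e r => exact ⟨e, r, rfl⟩
  obtain ⟨f, rest6, rfl⟩ : ∃ f r, rest5 = f :: r := by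
    cases rest5 with
    | nil => simp [Pre_dice_face_change] at hpre
    | cons f r => exact ⟨f, r, rfl⟩
  unfold dice_face_change dice_face_change_alt
  split_ifs <;>
    simp [List.range_succ, pvEast, pvNorth, pvGet, pvGet,
      PySem.List.pyGet?_of_nonneg]
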